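-- pv_equiv track=rewrite | github.com/matthewcriswell/python-workout | ch02/ex7.py | ubbi_dubbi
-- ===== SOURCE A (Python) =====
-- def ubbi_dubbi(word):
--     ubbi_dubbi = []
--     for letter in word:
--         if letter in 'aeiou':
--             ubbi_dubbi.append(f"ub{letter}")
--         else:
--             ubbi_dubbi.append(letter)
--     return ''.join(ubbi_dubbi)
-- ===== SOURCE B (Python) =====
-- def ubbi_dubbi(word):
--     # Stage 1: find every position where a vowel starts.
--     cuts = [i for i, c in enumerate(word) if c in 'aeiou']
--     # Stage 2: stitch the original string back together from the slices
--     # between consecutive cut points, inserting 'ub' at each cut.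
--     pieces = []
--     prev = 0
--     for i in cuts:
--         pieces.append(word[prev:i])
--         pieces.append('ub')
--         prev = i
--     pieces.append(word[prev:])
--     return ''.join(pieces)
-- ===== Notes on version B (the rewrite author's own statement) =====
-- stated objective: alternative
-- what changed: Instead of a per-character loop that branches and re-emits every letter, B first collects all vowel positions and then splices the original string from slices between consecutive cut points, inserting 'ub' at each cut; vowels are never re-emitted, they stay inside the slices.
import Mathlib
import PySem

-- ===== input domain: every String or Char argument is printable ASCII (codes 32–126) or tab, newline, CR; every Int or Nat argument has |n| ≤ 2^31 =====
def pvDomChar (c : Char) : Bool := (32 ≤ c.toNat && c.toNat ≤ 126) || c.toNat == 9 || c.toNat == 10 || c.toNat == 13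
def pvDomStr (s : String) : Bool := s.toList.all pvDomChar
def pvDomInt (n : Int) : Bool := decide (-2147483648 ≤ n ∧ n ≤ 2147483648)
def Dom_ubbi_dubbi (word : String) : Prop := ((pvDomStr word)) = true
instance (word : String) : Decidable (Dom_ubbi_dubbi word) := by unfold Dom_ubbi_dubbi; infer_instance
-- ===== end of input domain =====

-- B replaces A's per-character branch-and-emit loop by a two-stage splice: collect
-- the vowel positions, then stitch the string from slices between consecutive cuts
-- with 'ub' inserted at each cut (alternative decomposition; same return value).

-- ===== PORT A =====
def ubbi_dubbi (word : String) : String :=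
  let parts := word.toList.foldl (fun acc letter =>
    if letter ∈ "aeiou".toList then acc ++ [String.ofList ['u', 'b', letter]]
    else acc ++ [String.ofList [letter]]) ([] : List String)
  PySem.Str.join "" parts

-- ===== PORT B =====
-- ported on the character-list side (PySem.Chars / PySem.List.slice are exact for
-- Python's string slicing and ''.join): cuts = vowel positions via enumerate+filter,
-- then a fold over cuts appending word[prev:i] and 'ub', finally word[prev:] and join.
def ubbi_dubbi_alt (word : String) : String :=
  let cs := word.toList
  let cuts : List Int := (PySem.List.enumerate cs 0).filterMap
    (fun p => if p.2 ∈ "aeiou".toList then some p.1 else none)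
  let st := cuts.foldl (fun (st : List (List Char) × Int) i =>
    (st.1 ++ [PySem.List.slice cs (some st.2) (some i), ['u', 'b']], i))
    (([] : List (List Char)), (0 : Int))
  String.ofList (PySem.Chars.join [] (st.1 ++ [PySem.List.slice cs (some st.2) none]))

-- ===== PRECONDITION & SPEC =====
def Spec_ubbi_dubbi (word : String) (out : String) : Prop := out = ubbi_dubbi_alt word
instance (word : String) (out : String) : Decidable (Spec_ubbi_dubbi word out) := by unfold Spec_ubbi_dubbi; infer_instance

-- ===== CLAIM =====
def Claim_equal_ubbi_dubbi : Prop := ∀ (word : String), Dom_ubbi_dubbi word → Spec_ubbi_dubbi word (ubbi_dubbi word)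

-- ===== LEMMAS AND PROOFS =====

-- the per-letter piece A emits, on the list side
def pvPiece (c : Char) : List Char :=
  if c ∈ "aeiou".toList then ['u', 'b', c] else [c]

-- relative vowel positions of a character list
def pvCuts : List Char → List Nat
  | [] => []
  | c :: cs => (if c ∈ "aeiou".toList then [0] else []) ++ (pvCuts cs).map (· + 1)

-- the splice B performs, phrased over Nat cut positions
def pvSplice (cs0 : List Char) (prev : Nat) : List Nat → List Char
  | [] => cs0.drop prev
  | i :: is => (cs0.drop prev).take (i - prev) ++ ['u', 'b'] ++ pvSplice cs0 i is

-- the Nat cut positions as the Int values B's comprehension produces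
def pvCast : List Nat → List Int
  | [] => []
  | k :: is => (k : Int) :: pvCast is

-- A's foldl builds exactly the map of the per-letter piece.
theorem pv_foldl_pieces (cs : List Char) (acc : List String) :
    cs.foldl (fun acc letter =>
      if letter ∈ "aeiou".toList then acc ++ [String.ofList ['u', 'b', letter]]
      else acc ++ [String.ofList [letter]]) acc
    = acc ++ cs.map (fun letter =>
        if letter ∈ "aeiou".toList then String.ofList ['u', 'b', letter]
        else String.ofList [letter]) := by
  induction cs generalizing acc with
  | nil => simp
  | cons c cs ih =>
    rw [List.foldl_cons, ih]
    by_cases h : c = 'a' ∨ c = 'e' ∨ c = 'i' ∨ c = 'o' ∨ c = 'u'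
    · rw [if_pos (by simpa using h)]; simp [h]
    · rw [if_neg (by simpa using h)]; simp [h]

-- joining with the empty separator flattens.
theorem pv_join_empty (l : List (List Char)) :
    PySem.Chars.join [] l = l.flatten := by
  induction l with
  | nil => simp [PySem.Chars.join_nil]
  | cons p rest ih =>
    cases rest with
    | nil => simp [PySem.Chars.join_singleton]
    | cons q rest' => simp [PySem.Chars.join_cons_cons, ih]

-- B's cut comprehension computes pvCuts (shifted by the enumerate start).
theorem pv_cuts_enum (cs : List Char) (s : Nat) :
    (PySem.List.enumerate cs (s : Int)).filterMap
      (fun p => if p.2 ∈ "aeiou".toList then some p.1 else none)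
    = (pvCuts cs).map (fun k => ((s + k : Nat) : Int)) := by
  induction cs generalizing s with
  | nil => simp [PySem.List.enumerate_nil, pvCuts]
  | cons c cs ih =>
    rw [PySem.List.enumerate_cons]
    have h1 : ((s : Int) + 1) = ((s + 1 : Nat) : Int) := by push_cast; ring
    by_cases h : c ∈ "aeiou".toList
    · rw [List.filterMap_cons]
      simp only [if_pos h, h1, ih, pvCuts, List.singleton_append, List.map_cons,
        List.map_map, Nat.add_zero]
      congr 1
      apply List.map_congr_left; intro k _
      simp only [Function.comp_apply]; push_cast; ring
    · rw [List.filterMap_cons]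
      simp only [if_neg h, h1, ih, pvCuts, List.nil_append, List.map_map]
      apply List.map_congr_left; intro k _
      simp only [Function.comp_apply]; push_cast; ring

-- shifting: splicing the tail at shifted positions drops the head of both.
theorem pv_splice_shift (cs0 : List Char) (c : Char) (prev : Nat) (is : List Nat) :
    pvSplice (c :: cs0) (prev + 1) (is.map (· + 1)) = pvSplice cs0 prev is := by
  induction is generalizing prev with
  | nil => simp [pvSplice]
  | cons i is ih => simp [pvSplice, ih]

theorem pv_splice_shift0 (cs0 : List Char) (c : Char) (is : List Nat) :
    pvSplice (c :: cs0) 0 (is.map (· + 1)) = c :: pvSplice cs0 0 is := by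
  cases is with
  | nil => simp [pvSplice]
  | cons i is => simp [pvSplice, pv_splice_shift]

-- the splice at the vowel cuts reproduces A's per-letter pieces.
theorem pv_splice_cuts (cs : List Char) :
    pvSplice cs 0 (pvCuts cs) = cs.flatMap pvPiece := by
  induction cs with
  | nil => simp [pvSplice, pvCuts]
  | cons c cs ih =>
    rw [List.flatMap_cons]
    by_cases h : c ∈ "aeiou".toList
    · simp only [pvCuts, if_pos h, List.singleton_append, pvSplice, Nat.sub_zero,
        List.take_zero, List.nil_append, List.drop_zero]
      rw [pv_splice_shift0 cs c (pvCuts cs), ih]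
      simp only [pvPiece, if_pos h]
      simp
    · simp only [pvCuts, if_neg h, List.nil_append]
      rw [pv_splice_shift0 cs c (pvCuts cs), ih]
      simp only [pvPiece, if_neg h]
      simp

-- B's fold over the (cast) cuts computes the splice.
theorem pv_fold_splice (cs : List Char) (is : List Nat) (pieces : List (List Char)) (prev : Nat) :
    (((pvCast is).foldl (fun (st : List (List Char) × Int) i =>
        (st.1 ++ [PySem.List.slice cs (some st.2) (some i), ['u', 'b']], i))
        (pieces, (prev : Int))).1
      ++ [PySem.List.slice cs
            (some ((pvCast is).foldl (fun (st : List (List Char) × Int) i =>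
              (st.1 ++ [PySem.List.slice cs (some st.2) (some i), ['u', 'b']], i))
              (pieces, (prev : Int))).2) none]).flatten
    = pieces.flatten ++ pvSplice cs prev is := by
  induction is generalizing pieces prev with
  | nil =>
    simp only [pvCast, List.foldl_nil, pvSplice,
      PySem.List.slice_from_natCast, List.flatten_append, List.flatten_cons,
      List.flatten_nil, List.append_nil]
  | cons i is ih =>
    simp only [pvCast, List.foldl_cons]
    rw [ih]
    simp only [pvSplice, PySem.List.slice_natCast, List.flatten_append, List.flatten_cons,
      List.flatten_nil, List.append_nil, List.append_assoc]

-- ===== VERDICT =====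
theorem ubbi_dubbi_spec : Claim_equal_ubbi_dubbi := by
  intro word _
  unfold Spec_ubbi_dubbi ubbi_dubbi ubbi_dubbi_alt
  rw [pv_foldl_pieces]
  apply String.toList_inj.mp
  simp only [List.nil_append, PySem.Str.join, String.toList_ofList]
  rw [(by decide : "".toList = ([] : List Char))]
  have h0 : (PySem.List.enumerate word.toList 0).filterMap
      (fun p => if p.2 ∈ "aeiou".toList then some p.1 else none)
      = pvCast (pvCuts word.toList) := by
    have := pv_cuts_enum word.toList 0
    simp only [Nat.cast_zero] at this
    rw [this]; clear this
    induction pvCuts word.toList with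
    | nil => simp [pvCast]
    | cons k l ihl =>
      simp only [Nat.zero_add] at ihl ⊢
      simp only [List.map_cons, pvCast, ihl]
  rw [h0, pv_join_empty, pv_join_empty]
  have hfold := pv_fold_splice word.toList (pvCuts word.toList) [] 0
  simp only [List.flatten_nil, List.nil_append, Nat.cast_zero] at hfold
  rw [hfold, pv_splice_cuts]
  rw [show ((word.toList.map (fun letter =>
        if letter ∈ "aeiou".toList then String.ofList ['u', 'b', letter]
        else String.ofList [letter])).map String.toList).flatten
      = word.toList.flatMap pvPiece from by
    rw [List.map_map, ← List.flatMap_def]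
    apply List.flatMap_congr; intro c _
    by_cases h : c = 'a' ∨ c = 'e' ∨ c = 'i' ∨ c = 'o' ∨ c = 'u' <;> simp [pvPiece, h]]
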